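-- pv_equiv track=rewrite | github.com/lionell0901/study-log | pratice_0605.py | solution
-- ===== SOURCE A (Python) =====
-- def solution(answers):
--     p1 = [1, 2, 3, 4, 5]
--     p2 = [2, 1, 2, 3, 2, 4, 2, 5]
--     p3 = [3, 3, 1, 1, 2, 2, 4, 4, 5, 5]
--
--     score = [0, 0, 0]  # 각 사람 점수 저장
--
--     for i in range(len(answers)):
--         if answers[i] == p1[i % len(p1)]:
--             score[0] += 1
--         if answers[i] == p2[i % len(p2)]:
--             score[1] += 1
--         if answers[i] == p3[i % len(p3)]:
--             score[2] += 1
--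
--     max_score = max(score)
--     result = []
--     for i in range(3):
--         if score[i] == max_score:
--             result.append(i + 1)
--     return result
-- ===== SOURCE B (Python) =====
-- def solution(answers):
--     pats = [[1, 2, 3, 4, 5],
--             [2, 1, 2, 3, 2, 4, 2, 5],
--             [3, 3, 1, 1, 2, 2, 4, 4, 5, 5]]
--     # All three patterns repeat with period dividing 40 = lcm(5, 8, 10), so an answer at
--     # index i is judged only through (i % 40, answers[i]).  Build that frequency table in
--     # one pass, then read each person's score off the table with 40 lookups.
--     cnt = {}
--     for i, a in enumerate(answers):
--         key = (i % 40, a)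
--         cnt[key] = cnt.get(key, 0) + 1
--     scores = [sum(cnt.get((j, pat[j % len(pat)]), 0) for j in range(40)) for pat in pats]
--     m = max(scores)
--     return [i + 1 for i, s in enumerate(scores) if s == m]
-- ===== Notes on version B (the rewrite author's own statement) =====
-- stated objective: alternative
-- what changed: B replaces A's per-answer comparison against the three cyclic patterns with a hash-based aggregation: since all patterns repeat with period dividing 40, one pass builds a frequency dict keyed by (index % 40, answer) and each person's score is then read off with 40 dict lookups instead of a scan over the answers.
import Mathlib
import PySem

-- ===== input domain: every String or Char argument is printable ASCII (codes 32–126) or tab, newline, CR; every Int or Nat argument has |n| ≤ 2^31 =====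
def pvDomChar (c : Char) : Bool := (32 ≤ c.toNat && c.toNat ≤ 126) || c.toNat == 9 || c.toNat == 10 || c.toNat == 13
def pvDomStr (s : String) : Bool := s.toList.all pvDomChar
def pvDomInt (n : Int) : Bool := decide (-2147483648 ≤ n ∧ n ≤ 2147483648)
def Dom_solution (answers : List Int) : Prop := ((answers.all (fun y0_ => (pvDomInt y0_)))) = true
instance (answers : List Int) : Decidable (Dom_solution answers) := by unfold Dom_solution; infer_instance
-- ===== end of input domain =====

-- B replaces A's per-answer comparison against the three cyclic patterns by a frequency dict
-- keyed by (index % 40, answer) built in one pass; scores are then 40 dict lookups per person.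

-- ===== PORT A =====
-- Transliteration of A: single pass over the indices carrying a triple of counters; the loop body
-- (three sequential ifs rebinding score) is the helper pvStepA; max(score) is taken on the literal
-- nonempty 3-element score list, so Python's max never raises and the .getD 0 default is unreachable.
def pvStepA (s : Int × Int × Int) (i a : Int) : Int × Int × Int :=
  let p1 : List Int := [1, 2, 3, 4, 5]
  let p2 : List Int := [2, 1, 2, 3, 2, 4, 2, 5]
  let p3 : List Int := [3, 3, 1, 1, 2, 2, 4, 4, 5, 5]
  let s := if a = PySem.List.pyGetD p1 (PySem.Int.mod i (p1.length : Int)) 0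
           then (s.1 + 1, s.2.1, s.2.2) else s
  let s := if a = PySem.List.pyGetD p2 (PySem.Int.mod i (p2.length : Int)) 0
           then (s.1, s.2.1 + 1, s.2.2) else s
  if a = PySem.List.pyGetD p3 (PySem.Int.mod i (p3.length : Int)) 0
  then (s.1, s.2.1, s.2.2 + 1) else s
def solution (answers : List Int) : List Int :=
  let score : Int × Int × Int :=
    (PySem.List.pyRange 0 (answers.length : Int) 1).foldl
      (fun s i => pvStepA s i (PySem.List.pyGetD answers i 0)) (0, 0, 0)
  let scoreL : List Int := [score.1, score.2.1, score.2.2]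
  let maxScore : Int := (PySem.List.max? scoreL id).getD 0
  (PySem.List.pyRange 0 3 1).foldl
    (fun acc i => if PySem.List.pyGetD scoreL i 0 = maxScore then acc ++ [i + 1] else acc)
    []

-- ===== PORT B =====
-- Transliteration of B: one pass over enumerate(answers) building the dict cnt keyed by
-- (i % 40, a) via cnt[key] = cnt.get(key, 0) + 1; per-person scores are 40 lookups; winners
-- picked by enumerating the scores (max on the literal nonempty list: .getD 0 unreachable).
def solution_alt (answers : List Int) : List Int :=
  let pats : List (List Int) :=
    [[1, 2, 3, 4, 5], [2, 1, 2, 3, 2, 4, 2, 5], [3, 3, 1, 1, 2, 2, 4, 4, 5, 5]]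
  let cnt : PySem.Dict (Int × Int) Int :=
    (PySem.List.enumerate answers 0).foldl
      (fun d ia =>
        let key : Int × Int := (PySem.Int.mod ia.1 40, ia.2)
        d.insert key (d.getD key 0 + 1))
      PySem.Dict.empty
  let scores : List Int :=
    pats.map (fun pat =>
      ((PySem.List.pyRange 0 40 1).map (fun j =>
        cnt.getD (j, PySem.List.pyGetD pat (PySem.Int.mod j (pat.length : Int)) 0) 0)).sum)
  let m : Int := (PySem.List.max? scores id).getD 0
  (PySem.List.enumerate scores 0).foldl
    (fun acc is => if is.2 = m then acc ++ [is.1 + 1] else acc) []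

-- ===== PRECONDITION & SPEC =====
def Spec_solution (answers : List Int) (out : List Int) : Prop := out = solution_alt answers
instance (answers : List Int) (out : List Int) : Decidable (Spec_solution answers out) := by unfold Spec_solution; infer_instance

-- ===== CLAIM (what is proved, stated in full; the proofs are below) =====
def Claim_equal_solution : Prop := ∀ (answers : List Int), Dom_solution answers → Spec_solution answers (solution answers)

-- ===== LEMMAS AND PROOFS =====

-- A's per-pattern score for pattern `pat` over the suffix `xs` whose first index is `j`.
def pvCnt (pat xs : List Int) (j : Int) : Int :=
  ((PySem.List.enumerate xs j).map (fun ia =>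
    if ia.2 = PySem.List.pyGetD pat (PySem.Int.mod ia.1 (pat.length : Int)) 0
    then (1 : Int) else 0)).sum

-- A's index loop over `pre ++ xs`, starting at index |pre|, is the fold over enumerate xs |pre|.
theorem pv_loop_enum {β : Type} (F : β → Int → Int → β) :
    ∀ (xs pre : List Int) (acc : β),
      (PySem.List.pyRange (pre.length : Int) ((pre.length : Int) + (xs.length : Int)) 1).foldl
        (fun s i => F s i (PySem.List.pyGetD (pre ++ xs) i 0)) acc
      = (PySem.List.enumerate xs (pre.length : Int)).foldl (fun s ia => F s ia.1 ia.2) acc := by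
  intro xs
  induction xs with
  | nil =>
      intro pre acc
      rw [show ((pre.length : Int) + (([] : List Int).length : Int)) = (pre.length : Int) by simp]
      rw [PySem.List.pyRange_one_eq_nil le_rfl]
      simp [PySem.List.enumerate]
  | cons x xs ih =>
      intro pre acc
      have hx1 : (((x :: xs).length : Nat) : Int) = (xs.length : Int) + 1 := by
        simp only [List.length_cons, Nat.cast_add, Nat.cast_one]
      have hlt : (pre.length : Int) < (pre.length : Int) + ((x :: xs).length : Int) := by
        rw [hx1]; omega
      rw [PySem.List.pyRange_one_cons hlt]
      have hget : PySem.List.pyGetD (pre ++ x :: xs) (pre.length : Int) 0 = x := by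
        rw [PySem.List.pyGetD_eq_getElem _ _ (by omega)
          (by rw [List.length_append]; rw [show (((pre.length + (x :: xs).length : Nat)) : Int)
                = (pre.length : Int) + ((x :: xs).length : Int) by push_cast; ring, hx1]; omega)]
        simp
      have hb : (pre.length : Int) + ((x :: xs).length : Int)
          = ((pre.length : Int) + 1) + (xs.length : Int) := by rw [hx1]; ring
      have hpre1 : (((pre ++ [x]).length : Nat) : Int) = (pre.length : Int) + 1 := by
        rw [List.length_append]; push_cast; simp
      have h2 := ih (pre ++ [x]) (F acc (pre.length : Int) x)
      rw [hpre1] at h2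
      simp only [List.foldl_cons, hget, PySem.List.enumerate_cons]
      rw [hb, List.append_cons]
      exact h2

-- A's fold of the three-counter step is the triple of per-pattern 0/1-sums.
theorem pv_triple :
    ∀ (xs : List Int) (j a b c : Int),
      (PySem.List.enumerate xs j).foldl (fun s ia => pvStepA s ia.1 ia.2) (a, b, c)
      = (a + pvCnt [1, 2, 3, 4, 5] xs j,
         b + pvCnt [2, 1, 2, 3, 2, 4, 2, 5] xs j,
         c + pvCnt [3, 3, 1, 1, 2, 2, 4, 4, 5, 5] xs j) := by
  intro xs
  induction xs with
  | nil => intro j a b c; simp [pvCnt, PySem.List.enumerate]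
  | cons x xs ih =>
      intro j a b c
      simp only [PySem.List.enumerate_cons, List.foldl_cons]
      have hc : ∀ P : List Int, pvCnt P (x :: xs) j =
          (if x = PySem.List.pyGetD P (PySem.Int.mod j (P.length : Int)) 0 then (1 : Int) else 0)
            + pvCnt P xs (j + 1) := by
        intro P; simp [pvCnt, PySem.List.enumerate_cons]
      rw [hc, hc, hc]
      have hstep : ∀ (a b c i x : Int), pvStepA (a, b, c) i x
          = (a + (if x = PySem.List.pyGetD [1, 2, 3, 4, 5] (PySem.Int.mod i (([1, 2, 3, 4, 5] : List Int).length : Int)) 0 then (1 : Int) else 0),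
             b + (if x = PySem.List.pyGetD [2, 1, 2, 3, 2, 4, 2, 5] (PySem.Int.mod i (([2, 1, 2, 3, 2, 4, 2, 5] : List Int).length : Int)) 0 then (1 : Int) else 0),
             c + (if x = PySem.List.pyGetD [3, 3, 1, 1, 2, 2, 4, 4, 5, 5] (PySem.Int.mod i (([3, 3, 1, 1, 2, 2, 4, 4, 5, 5] : List Int).length : Int)) 0 then (1 : Int) else 0)) := by
        intro a b c i x
        simp only [pvStepA]
        split_ifs <;> simp
      rw [hstep, ih]
      simp only [Prod.mk.injEq]
      refine ⟨by ring, by ring, by ring⟩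

-- The key list B's dict counts: (i % 40, answers[i]) for enumerate(answers, s).
def pvKeys (xs : List Int) (s : Int) : List (Int × Int) :=
  (PySem.List.enumerate xs s).map (fun ia => (PySem.Int.mod ia.1 40, ia.2))

-- Σ_{j ∈ range(40)} (if c = j then u else 0) collapses to u when 0 ≤ c < 40.
theorem pv_sum_ite (c : Int) (u : Int) (h0 : 0 ≤ c) (h40 : c < 40) :
    ((PySem.List.pyRange 0 40 1).map (fun j => if c = j then u else 0)).sum = u := by
  have : PySem.List.pyRange 0 40 1
      = PySem.List.pyRange 0 c 1 ++ c :: PySem.List.pyRange (c + 1) 40 1 := by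
    rw [PySem.List.pyRange_one_append 0 c 40 h0 (by omega),
        PySem.List.pyRange_one_cons (show c < 40 by omega)]
  rw [this]
  simp only [List.map_append, List.map_cons, List.sum_append, List.sum_cons]
  have z1 : ((PySem.List.pyRange 0 c 1).map (fun j => if c = j then u else 0)).sum = 0 := by
    rw [List.sum_eq_zero]; intro y hy
    simp only [List.mem_map] at hy
    obtain ⟨j, hj, hy⟩ := hy
    rw [PySem.List.mem_pyRange_one] at hj
    rw [← hy, if_neg (by omega)]
  have z2 : ((PySem.List.pyRange (c + 1) 40 1).map (fun j => if c = j then u else 0)).sum = 0 := by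
    rw [List.sum_eq_zero]; intro y hy
    simp only [List.mem_map] at hy
    obtain ⟨j, hj, hy⟩ := hy
    rw [PySem.List.mem_pyRange_one] at hj
    rw [← hy, if_neg (by omega)]
  rw [z1, z2]; simp

-- Reading pattern `pat` through the mod-40 table is reading it directly (period divides 40).
theorem pv_patval (pat : List Int) (hd : (pat.length : Int) ∣ 40) (hp : 0 < pat.length)
    (i : Int) :
    PySem.List.pyGetD pat (PySem.Int.mod (PySem.Int.mod i 40) (pat.length : Int)) 0
      = PySem.List.pyGetD pat (PySem.Int.mod i (pat.length : Int)) 0 := by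
  have hl : (0 : Int) < (pat.length : Int) := by exact_mod_cast hp
  rw [PySem.Int.mod_eq_emod_of_pos (show (0:Int) < 40 by norm_num),
      PySem.Int.mod_eq_emod_of_pos hl, PySem.Int.mod_eq_emod_of_pos hl,
      Int.emod_emod_of_dvd i hd]

-- B's 40 table lookups for pattern `pat` add up to A's per-pattern score.
theorem pv_table (pat : List Int) (hd : (pat.length : Int) ∣ 40) (hp : 0 < pat.length) :
    ∀ (xs : List Int) (s : Int),
    ((PySem.List.pyRange 0 40 1).map (fun j =>
        ((pvKeys xs s).count
          (j, PySem.List.pyGetD pat (PySem.Int.mod j (pat.length : Int)) 0) : Int))).sum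
      = pvCnt pat xs s := by
  intro xs
  induction xs with
  | nil =>
      intro s
      simp [pvKeys, pvCnt, PySem.List.enumerate, List.sum_eq_zero]
  | cons x xs ih =>
      intro s
      have hkeys : pvKeys (x :: xs) s = (PySem.Int.mod s 40, x) :: pvKeys xs (s + 1) := by
        simp [pvKeys, PySem.List.enumerate_cons]
      have hcnt : pvCnt pat (x :: xs) s =
          (if x = PySem.List.pyGetD pat (PySem.Int.mod s (pat.length : Int)) 0
           then (1 : Int) else 0) + pvCnt pat xs (s + 1) := by
        simp [pvCnt, PySem.List.enumerate_cons]
      rw [hkeys, hcnt, ← ih (s + 1)]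
      have hcc : ∀ j : Int,
          (((PySem.Int.mod s 40, x) :: pvKeys xs (s + 1)).count
              (j, PySem.List.pyGetD pat (PySem.Int.mod j (pat.length : Int)) 0) : Int)
          = ((pvKeys xs (s + 1)).count
              (j, PySem.List.pyGetD pat (PySem.Int.mod j (pat.length : Int)) 0) : Int)
            + (if (j, PySem.List.pyGetD pat (PySem.Int.mod j (pat.length : Int)) 0)
                  = (PySem.Int.mod s 40, x) then 1 else 0) := by
        intro j
        rw [List.count_cons]
        simp only [beq_iff_eq]
        split_ifs with h1 h2 h2
        · push_cast; ring
        · exact absurd h1.symm h2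
        · exact absurd h2.symm h1
        · push_cast; ring
      have hmap : ((PySem.List.pyRange 0 40 1).map (fun j =>
            (((PySem.Int.mod s 40, x) :: pvKeys xs (s + 1)).count
              (j, PySem.List.pyGetD pat (PySem.Int.mod j (pat.length : Int)) 0) : Int))).sum
          = ((PySem.List.pyRange 0 40 1).map (fun j =>
              ((pvKeys xs (s + 1)).count
                (j, PySem.List.pyGetD pat (PySem.Int.mod j (pat.length : Int)) 0) : Int))).sum
            + ((PySem.List.pyRange 0 40 1).map (fun j =>
                if (j, PySem.List.pyGetD pat (PySem.Int.mod j (pat.length : Int)) 0)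
                    = (PySem.Int.mod s 40, x) then (1 : Int) else 0)).sum := by
        rw [← PySem.List.sum_map_add_int]
        exact congrArg List.sum (List.map_congr_left (fun j _ => hcc j))
      rw [hmap]
      have hmem : 0 ≤ PySem.Int.mod s 40 ∧ PySem.Int.mod s 40 < 40 :=
        ⟨PySem.Int.mod_nonneg s (by norm_num), PySem.Int.mod_lt s (by norm_num)⟩
      have hind : ((PySem.List.pyRange 0 40 1).map (fun j =>
            if (j, PySem.List.pyGetD pat (PySem.Int.mod j (pat.length : Int)) 0)
                = (PySem.Int.mod s 40, x) then (1 : Int) else 0)).sum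
          = if x = PySem.List.pyGetD pat (PySem.Int.mod s (pat.length : Int)) 0
            then (1 : Int) else 0 := by
        by_cases hx : x = PySem.List.pyGetD pat (PySem.Int.mod s (pat.length : Int)) 0
        · rw [if_pos hx]
          have : ∀ j, ((j, PySem.List.pyGetD pat (PySem.Int.mod j (pat.length : Int)) 0)
                = (PySem.Int.mod s 40, x)) ↔ (PySem.Int.mod s 40 = j) := by
            intro j
            constructor
            · intro h; exact (Prod.mk.injEq _ _ _ _ ▸ h).1.symm
            · intro h
              rw [Prod.mk.injEq]
              refine ⟨h.symm, ?_⟩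
              rw [← h, pv_patval pat hd hp s, hx]
          calc ((PySem.List.pyRange 0 40 1).map (fun j =>
                  if (j, PySem.List.pyGetD pat (PySem.Int.mod j (pat.length : Int)) 0)
                      = (PySem.Int.mod s 40, x) then (1 : Int) else 0)).sum
              = ((PySem.List.pyRange 0 40 1).map (fun j =>
                  if PySem.Int.mod s 40 = j then (1 : Int) else 0)).sum := by
                exact congrArg List.sum (List.map_congr_left (fun j _ => by
                  by_cases h : PySem.Int.mod s 40 = j
                  · rw [if_pos ((this j).mpr h), if_pos h]
                  · rw [if_neg (fun hh => h ((this j).mp hh)), if_neg h]))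
            _ = 1 := pv_sum_ite _ 1 hmem.1 hmem.2
        · rw [if_neg hx, List.sum_eq_zero]
          intro y hy
          simp only [List.mem_map] at hy
          obtain ⟨j, _, hy⟩ := hy
          rw [← hy]
          rw [if_neg]
          intro h
          rw [Prod.mk.injEq] at h
          obtain ⟨hj, hv⟩ := h
          apply hx
          rw [← hv, hj, pv_patval pat hd hp s]
      rw [hind]; ring

-- The programs agree (no Pre_: both are total).
theorem pv_spec (answers : List Int) : solution answers = solution_alt answers := by
  unfold solution solution_alt
  have h0 := pv_loop_enum
    (F := fun (s : Int × Int × Int) i a => pvStepA s i a) answers [] ((0, 0, 0) : Int × Int × Int)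
  simp only [List.length_nil, Nat.cast_zero, List.nil_append, zero_add] at h0
  rw [h0, pv_triple]
  -- B's dict built over enumerate is the counter fold over pvKeys
  have hfold : (PySem.List.enumerate answers 0).foldl
      (fun (d : PySem.Dict (Int × Int) Int) ia =>
        let key : Int × Int := (PySem.Int.mod ia.1 40, ia.2)
        d.insert key (d.getD key 0 + 1)) PySem.Dict.empty
      = (pvKeys answers 0).foldl
          (fun (d : PySem.Dict (Int × Int) Int) k => d.insert k (d.getD k 0 + 1))
          PySem.Dict.empty := by
    rw [pvKeys, List.foldl_map]
  rw [hfold]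
  have hlook : ∀ q : Int × Int,
      (((pvKeys answers 0).foldl
        (fun (d : PySem.Dict (Int × Int) Int) k => d.insert k (d.getD k 0 + 1))
        PySem.Dict.empty).getD q 0) = ((pvKeys answers 0).count q : Int) := by
    intro q
    rw [PySem.Dict.getD_foldl_insert_add_one, PySem.Dict.getD_empty]
    ring
  have hscore : ∀ pat : List Int, (pat.length : Int) ∣ 40 → 0 < pat.length →
      ((PySem.List.pyRange 0 40 1).map (fun j =>
        (((pvKeys answers 0).foldl
          (fun (d : PySem.Dict (Int × Int) Int) k => d.insert k (d.getD k 0 + 1))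
          PySem.Dict.empty).getD
            (j, PySem.List.pyGetD pat (PySem.Int.mod j (pat.length : Int)) 0) 0))).sum
      = pvCnt pat answers 0 := by
    intro pat hd hp
    rw [List.map_congr_left (fun j _ => hlook _)]
    exact pv_table pat hd hp answers 0
  have hs1 := hscore [1, 2, 3, 4, 5] (by norm_num) (by norm_num)
  have hs2 := hscore [2, 1, 2, 3, 2, 4, 2, 5] (by norm_num) (by norm_num)
  have hs3 := hscore [3, 3, 1, 1, 2, 2, 4, 4, 5, 5] (by norm_num) (by norm_num)
  simp only [zero_add, List.map_cons, List.map_nil, hs1, hs2, hs3]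
  have hr : PySem.List.pyRange 0 3 1 = [0, 1, 2] := by decide
  rw [hr]
  simp only [List.foldl_cons, List.foldl_nil,
    PySem.List.enumerate_cons, PySem.List.enumerate_nil]
  have g0 : ∀ c1 c2 c3 : Int, PySem.List.pyGetD [c1, c2, c3] 0 0 = c1 := fun _ _ _ => rfl
  have g1 : ∀ c1 c2 c3 : Int, PySem.List.pyGetD [c1, c2, c3] 1 0 = c2 := fun _ _ _ => rfl
  have g2 : ∀ c1 c2 c3 : Int, PySem.List.pyGetD [c1, c2, c3] 2 0 = c3 := fun _ _ _ => rfl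
  simp only [g0, g1, g2]
  norm_num

-- ===== VERDICT (by name: the statement is the Claim_ definition above) =====
theorem solution_spec : Claim_equal_solution := by
  intro answers _
  unfold Spec_solution
  exact pv_spec answers
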